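-- pv_equiv track=rewrite | github.com/YazanHajjaj/All-macos | lab quiz projects/COE-YAZANHAJJAJ-ASSIGNMENT 3.py | hist_b
-- ===== SOURCE A (Python) =====
-- def hist_b(hist_a_result):
--     hist_freq_dict = {}
--     #     Creates a new dictionary mapping frequencies to letters.
--     for char, freq in hist_a_result.items():
--         if freq in hist_freq_dict:
--             hist_freq_dict[freq].append(char)
--         else:
--             hist_freq_dict[freq] = [char]
--
--     return hist_freq_dict
-- ===== SOURCE B (Python) =====
-- def hist_b(hist_a_result):
--     # Two-pass grouping: collect the distinct frequencies in first-appearance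
--     # order, then build each group with one scan per frequency.
--     items = list(hist_a_result.items())
--     freqs = list(dict.fromkeys(freq for _, freq in items))
--     return {f: [c for c, fr in items if fr == f] for f in freqs}
-- ===== Notes on version B (the rewrite author's own statement) =====
-- stated objective: alternative
-- what changed: Replaces the single-pass hash-bucket insertion loop with a two-pass scheme: first dedup the frequencies in first-appearance order, then build each group by a comprehension scan over the items.
import Mathlib
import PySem

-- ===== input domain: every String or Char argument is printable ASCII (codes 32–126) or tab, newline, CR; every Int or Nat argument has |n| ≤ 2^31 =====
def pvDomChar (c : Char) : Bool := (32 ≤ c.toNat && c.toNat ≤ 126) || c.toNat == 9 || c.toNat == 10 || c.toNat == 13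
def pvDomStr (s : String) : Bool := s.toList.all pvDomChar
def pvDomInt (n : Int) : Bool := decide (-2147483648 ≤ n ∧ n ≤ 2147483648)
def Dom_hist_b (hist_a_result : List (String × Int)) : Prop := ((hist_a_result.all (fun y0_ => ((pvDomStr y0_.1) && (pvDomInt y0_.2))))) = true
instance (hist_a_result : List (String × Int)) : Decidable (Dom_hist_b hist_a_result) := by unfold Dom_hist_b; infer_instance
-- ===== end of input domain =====

-- B groups by frequency with a dedup-then-scan-per-frequency pass instead of A's single insertion loop into hash buckets (alternative decomposition, same results).


-- ===== PORT A =====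
-- for char, freq in …: if freq in d: d[freq].append(char) else: d[freq] = [char]
def hist_b (hist_a_result : List (String × Int)) : List (Int × List String) :=
  (hist_a_result.foldl
    (fun d cf =>
      if d.contains cf.2 then d.modify cf.2 [] (fun l => l ++ [cf.1])
      else d.insert cf.2 [cf.1])
    (PySem.Dict.empty : PySem.Dict Int (List String))).items

-- ===== PORT B =====
-- freqs = list(dict.fromkeys(freqs)); {f: [c for c, fr in items if fr == f] for f in freqs}
def hist_b_alt (hist_a_result : List (String × Int)) : List (Int × List String) :=
  let freqs := PySem.List.dedup (hist_a_result.map (·.2))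
  freqs.map (fun f => (f, (hist_a_result.filter (fun cf => cf.2 == f)).map (·.1)))

-- ===== PRECONDITION & SPEC =====
def Spec_hist_b (hist_a_result : List (String × Int)) (out : List (Int × List String)) : Prop := out = hist_b_alt hist_a_result
instance (hist_a_result : List (String × Int)) (out : List (Int × List String)) : Decidable (Spec_hist_b hist_a_result out) := by unfold Spec_hist_b; infer_instance

-- ===== CLAIM (what is proved, stated in full; the proofs are below) =====
def Claim_equal_hist_b : Prop := ∀ (hist_a_result : List (String × Int)), Dom_hist_b hist_a_result → Spec_hist_b hist_a_result (hist_b hist_a_result)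

-- ===== LEMMAS AND PROOFS =====

-- A's branchy loop body is exactly PySem.Dict.modify with default []
theorem hist_b_step_eq_modify (d : PySem.Dict Int (List String)) (cf : String × Int) :
    (if d.contains cf.2 then d.modify cf.2 [] (fun l => l ++ [cf.1])
     else d.insert cf.2 [cf.1])
      = d.modify cf.2 [] (fun l => l ++ [cf.1]) := by
  split_ifs with h
  · rfl
  · have h' : d.contains cf.2 = false := by simpa using h
    simp [PySem.Dict.modify, PySem.Dict.getD_of_not_contains _ _ h']

-- A's loop, rewritten as the canonical keyed modify-fold
theorem hist_b_foldl_eq (xs : List (String × Int)) :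
    xs.foldl
      (fun d cf =>
        if d.contains cf.2 then d.modify cf.2 [] (fun l => l ++ [cf.1])
        else d.insert cf.2 [cf.1])
      (PySem.Dict.empty : PySem.Dict Int (List String))
    = xs.foldl (fun d cf => d.modify cf.2 [] (fun l => l ++ [cf.1])) PySem.Dict.empty := by
  simp only [hist_b_step_eq_modify]

theorem hist_b_spec_aux (xs : List (String × Int)) : hist_b xs = hist_b_alt xs := by
  unfold hist_b hist_b_alt
  rw [hist_b_foldl_eq]
  set F := xs.foldl (fun d cf => d.modify cf.2 [] (fun l => l ++ [cf.1]))
    (PySem.Dict.empty : PySem.Dict Int (List String)) with hF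
  have hnd : F.keys.Nodup := by
    rw [hF]
    exact PySem.Dict.nodup_keys_foldl_modify_key xs (·.2) [] (fun d cf l => l ++ [cf.1])
      PySem.Dict.empty (by simp)
  have hkeys : F.keys = PySem.List.dedup (xs.map (·.2)) := by
    rw [hF, PySem.Dict.keys_foldl_modify_key]
    simp [PySem.Dict.keys_empty, PySem.Set.update_nil_left]
  have hget : ∀ c : Int, F.getD c [] = (xs.filter (fun cf => cf.2 == c)).map (·.1) := by
    intro c
    have hmap : (xs.map (fun cf : String × Int => (cf.2, cf.1))).foldl
        (fun (d : PySem.Dict Int (List String)) p => d.modify p.1 [] (fun l => l ++ [p.2]))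
        PySem.Dict.empty = F := by
      rw [hF, List.foldl_map]
    rw [← hmap, PySem.Dict.getD_foldl_modify_append]
    simp [List.filter_map, List.map_map, Function.comp_def]
  rw [PySem.Dict.items_eq_map_keys F hnd [], hkeys]
  exact List.map_congr_left (fun f _ => by rw [hget f])

-- ===== VERDICT (by name: the statement is the Claim_ definition above) =====
theorem hist_b_spec : Claim_equal_hist_b := by
  intro xs _
  exact hist_b_spec_aux xs
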